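-- pv_equiv track=rewrite | github.com/samoylenkodmitry/compose-rs-proposal | gen.py | extract_leading_docs
-- ===== SOURCE A (Python) =====
-- def extract_leading_docs(code: str, max_lines: int = 120) -> str:
--     lines = code.splitlines()
--     collected = []
--     opened_block = False
--     for i, ln in enumerate(lines[:max_lines]):
--         s = ln.strip()
--         if s.startswith("//!") or s.startswith("///") or s.startswith("//"):
--             collected.append(ln)
--             continue
--         if s.startswith("/*"):
--             opened_block = True
--             collected.append(ln)
--             continue
--         if opened_block:
--             collected.append(ln)
--             if "*/" in s:
--                 opened_block = False
--             continue
--         collected.extend(lines[i:i+20])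
--         break
--     return "\n".join(collected[:max_lines])
-- ===== SOURCE B (Python) =====
-- def _classify(ln):
--     s = ln.strip()
--     if s.startswith("//"):
--         return "doc"
--     if s.startswith("/*"):
--         return "open"
--     return "close" if "*/" in s else "plain"
--
--
-- def _boundary(kinds, inside):
--     """Relative index of the first non-doc line, built back up from the recursion."""
--     if not kinds:
--         return None
--     k, rest = kinds[0], kinds[1:]
--     if k == "doc":
--         sub = _boundary(rest, inside)
--     elif k == "open":
--         sub = _boundary(rest, True)
--     elif inside:
--         sub = _boundary(rest, k != "close")
--     else:
--         return 0
--     return None if sub is None else sub + 1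
--
--
-- def extract_leading_docs(code: str, max_lines: int = 120) -> str:
--     """Staged: classify each line, recursively find the boundary, emit one slice."""
--     lines = code.splitlines()
--     head = lines[:max_lines]
--     b = _boundary([_classify(ln) for ln in head], False)
--     chosen = head if b is None else lines[:b + 20]
--     return "\n".join(chosen[:max_lines])
-- ===== Notes on version B (the rewrite author's own statement) =====
-- stated objective: alternative
-- what changed: B replaces A's accumulating state machine by three staged passes: a per-line classification into a small kind enum, a recursive boundary search over the kind list that returns a relative index rebuilt by +1 on the way out of the recursion, and one final slice lines[:b+20][:max_lines]; A instead appends every line into a list inside one enumerate loop and extends it with a 20-line tail.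
import Mathlib
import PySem

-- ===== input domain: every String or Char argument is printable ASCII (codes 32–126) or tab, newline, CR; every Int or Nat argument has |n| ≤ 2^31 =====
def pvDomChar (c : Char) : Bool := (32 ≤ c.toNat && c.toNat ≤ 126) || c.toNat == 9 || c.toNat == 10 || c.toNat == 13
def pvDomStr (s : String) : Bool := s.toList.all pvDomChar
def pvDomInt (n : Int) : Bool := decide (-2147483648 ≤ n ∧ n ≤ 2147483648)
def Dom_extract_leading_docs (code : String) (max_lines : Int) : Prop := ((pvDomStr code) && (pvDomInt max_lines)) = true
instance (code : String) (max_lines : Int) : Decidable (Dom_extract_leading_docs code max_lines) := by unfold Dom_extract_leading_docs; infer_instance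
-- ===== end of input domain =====

-- B classifies every line into a small kind enum, finds the boundary by a recursion that
-- returns a relative index, and emits one slice; A accumulates lines in one enumerate loop.


-- ===== PORT A =====
-- A's loop: collect every doc/comment line; at the first other line extend with lines[i:i+20] and stop.
def extractALoop (lines : List String) : List (Int × String) → Bool → List String
  | [], _ => []
  | (i, ln) :: rest, opened_block =>
    let s := PySem.Str.strip ln
    if PySem.Str.startswith s "//!" || PySem.Str.startswith s "///" || PySem.Str.startswith s "//" then
      ln :: extractALoop lines rest opened_block
    else if PySem.Str.startswith s "/*" then
      ln :: extractALoop lines rest true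
    else if opened_block then
      ln :: extractALoop lines rest (if PySem.Str.isIn "*/" s then false else opened_block)
    else
      PySem.List.slice lines (some i) (some (i + 20))

def extract_leading_docs (code : String) (max_lines : Int) : String :=
  let lines := PySem.Str.splitlines code
  let collected :=
    extractALoop lines (PySem.List.enumerate (PySem.List.slice lines none (some max_lines)) 0) false
  PySem.Str.join "\n" (PySem.List.slice collected none (some max_lines))

-- ===== PORT B =====
-- B stage 1: classify one line into a kind.
inductive DocKind : Type
  | doc | opn | close | plain
deriving DecidableEq, Repr

def classifyLine (ln : String) : DocKind :=
  let s := PySem.Str.strip ln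
  if PySem.Str.startswith s "//" then .doc
  else if PySem.Str.startswith s "/*" then .opn
  else if PySem.Str.isIn "*/" s then .close
  else .plain

-- B stage 2: recursive boundary search over the kind list; the relative index of the
-- first non-doc line is rebuilt by +1 on the way out of the recursion.
def boundaryIdx : List DocKind → Bool → Option Nat
  | [], _ => none
  | k :: rest, inside =>
    match k, inside with
    | .doc, _ => (boundaryIdx rest inside).map (· + 1)
    | .opn, _ => (boundaryIdx rest true).map (· + 1)
    | .close, true => (boundaryIdx rest false).map (· + 1)
    | .plain, true => (boundaryIdx rest true).map (· + 1)
    | _, false => some 0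

def extract_leading_docs_alt (code : String) (max_lines : Int) : String :=
  let lines := PySem.Str.splitlines code
  let head := PySem.List.slice lines none (some max_lines)
  let chosen :=
    match boundaryIdx (head.map classifyLine) false with
    | none => head
    | some b => PySem.List.slice lines none (some ((b : Int) + 20))
  PySem.Str.join "\n" (PySem.List.slice chosen none (some max_lines))

-- ===== PRECONDITION & SPEC =====
def Spec_extract_leading_docs (code : String) (max_lines : Int) (out : String) : Prop := out = extract_leading_docs_alt code max_lines
instance (code : String) (max_lines : Int) (out : String) : Decidable (Spec_extract_leading_docs code max_lines out) := by unfold Spec_extract_leading_docs; infer_instance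

-- ===== CLAIM =====
def Claim_equal_extract_leading_docs : Prop := ∀ (code : String) (max_lines : Int), Dom_extract_leading_docs code max_lines → Spec_extract_leading_docs code max_lines (extract_leading_docs code max_lines)

-- ===== LEMMAS AND PROOFS =====

-- A's three startswith tests collapse to the single "//" test behind DocKind.doc.
lemma docline_collapse (s : String) :
    (PySem.Str.startswith s "//!" || PySem.Str.startswith s "///" || PySem.Str.startswith s "//")
      = PySem.Str.startswith s "//" := by
  cases h : PySem.Str.startswith s "//" with
  | true => simp
  | false =>
    have h2 : ¬ (String.toList "//" <+: s.toList) := by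
      intro hp
      rw [PySem.Str.startswith_eq, (PySem.Chars.startswith_iff _ _).2 hp] at h
      simp at h
    have hb : ∀ p : String, String.toList "//" <+: p.toList →
        PySem.Str.startswith s p = false := by
      intro p hpp
      cases hq : PySem.Str.startswith s p with
      | true =>
        rw [PySem.Str.startswith_eq] at hq
        exact absurd (hpp.trans ((PySem.Chars.startswith_iff _ _).1 hq)) h2
      | false => rfl
    rw [hb "//!" (by decide), hb "///" (by decide)]
    simp

-- xs[:b] is a prefix of xs for every Int bound b.
lemma slice_to_prefix {α : Type} (xs : List α) (b : Int) :
    PySem.List.slice xs none (some b) <+: xs := by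
  rcases lt_or_ge b 0 with h | h
  swap
  · rw [PySem.List.slice_to _ h]; exact List.take_prefix _ _
  · have hk : 0 < (-b).toNat := by omega
    have hb : b = -(((-b).toNat : Nat) : Int) := by omega
    rw [hb, PySem.List.slice_to_neg_natCast _ _ hk]
    exact List.take_prefix _ _

-- Core invariant: A's collector equals u on a clean run, and the first j+20 lines of the
-- remaining suffix when B's boundary recursion stops at relative index j.
lemma main_loop (lines : List String) : ∀ (u : List String) (k : Nat) (op : Bool),
    u <+: lines.drop k →
    extractALoop lines (PySem.List.enumerate u (k : Int)) op =
      (match boundaryIdx (u.map classifyLine) op with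
       | none => u
       | some j => (lines.drop k).take (j + 20)) := by
  intro u
  induction u with
  | nil =>
    intro k op _
    simp [PySem.List.enumerate_nil, extractALoop, boundaryIdx]
  | cons ln tl ih =>
    intro k op hpre
    have hdk : lines.drop k = ln :: lines.drop (k + 1) := by
      obtain ⟨t, ht⟩ := hpre
      rw [← List.tail_drop, ← ht]
      simp
    have htl : tl <+: lines.drop (k + 1) := by
      obtain ⟨t, ht⟩ := hpre
      rw [hdk] at ht
      exact ⟨t, by simpa using ht⟩
    have hcast : (k : Int) + 1 = ((k + 1 : Nat) : Int) := by push_cast; ring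
    rw [PySem.List.enumerate_cons, hcast]
    simp only [extractALoop, docline_collapse, List.map_cons, classifyLine]
    by_cases h1 : PySem.Str.startswith (PySem.Str.strip ln) "//"
    · rw [if_pos h1]
      rw [ih (k+1) op htl]
      simp only [if_pos h1, boundaryIdx]
      cases boundaryIdx (tl.map classifyLine) op with
      | none => simp
      | some j =>
        simp only [Option.map_some]
        rw [hdk]
        rfl
    · rw [if_neg h1]
      by_cases h2 : PySem.Str.startswith (PySem.Str.strip ln) "/*"
      · rw [if_pos h2]
        rw [ih (k+1) true htl]
        simp only [if_neg h1, if_pos h2, boundaryIdx]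
        cases boundaryIdx (tl.map classifyLine) true with
        | none => simp
        | some j =>
          simp only [Option.map_some]
          rw [hdk]
          rfl
      · rw [if_neg h2]
        by_cases h3 : op
        · subst h3
          rw [if_pos rfl]
          by_cases h4 : PySem.Str.isIn "*/" (PySem.Str.strip ln)
          · rw [if_pos h4, ih (k+1) false htl]
            simp only [if_neg h1, if_neg h2, if_pos h4, boundaryIdx]
            cases boundaryIdx (tl.map classifyLine) false with
            | none => simp
            | some j =>
              simp only [Option.map_some]
              rw [hdk]
              rfl
          · rw [if_neg h4, ih (k+1) true htl]
            simp only [if_neg h1, if_neg h2, if_neg h4, boundaryIdx]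
            cases boundaryIdx (tl.map classifyLine) true with
            | none => simp
            | some j =>
              simp only [Option.map_some]
              rw [hdk]
              rfl
        · have h3' : op = false := by simpa using h3
          subst h3'
          rw [if_neg (by simp)]
          have h20 : ((k : Int) + 20) = (k : Int) + ((20 : Nat) : Int) := by norm_num
          by_cases h4 : PySem.Str.isIn "*/" (PySem.Str.strip ln)
          · simp only [if_neg h1, if_neg h2, if_pos h4]
            rw [h20, PySem.List.slice_natCast_add]
            simp [boundaryIdx]
          · simp only [if_neg h1, if_neg h2, if_neg h4]
            rw [h20, PySem.List.slice_natCast_add]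
            simp [boundaryIdx]

-- ===== VERDICT =====
theorem extract_leading_docs_spec : Claim_equal_extract_leading_docs := by
  intro code max_lines _
  unfold Spec_extract_leading_docs
  simp only [extract_leading_docs, extract_leading_docs_alt]
  have hpre : PySem.List.slice (PySem.Str.splitlines code) none (some max_lines)
      <+: (PySem.Str.splitlines code).drop 0 := by
    simpa using slice_to_prefix (PySem.Str.splitlines code) max_lines
  have h0 : (0 : Int) = ((0 : Nat) : Int) := rfl
  rw [h0, main_loop _ _ 0 false hpre]
  cases hB : boundaryIdx ((PySem.List.slice (PySem.Str.splitlines code) none (some max_lines)).map classifyLine) false with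
  | none => rfl
  | some j =>
    have hsl : PySem.List.slice (PySem.Str.splitlines code) none (some ((j : Int) + 20))
        = (PySem.Str.splitlines code).take (j + 20) := by
      rw [PySem.List.slice_to _ (by omega)]
      have ht : ((j : Int) + 20).toNat = j + 20 := by omega
      rw [ht]
    simp only [hsl, List.drop_zero]
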